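-- pv_equiv track=rewrite | github.com/AimaAlakhume/Grid-Challenge | solution.py | gridChallenge
-- ===== SOURCE A (Python) =====
-- def gridChallenge(grid):
--     new_grid = []
--
--     for str in grid:
--         sorted_list = sorted(str)
--         new_str = ''.join(sorted_list)
--         new_grid.append(new_str)
--
--     row = 0
--     col = 0
--
--     total = 0
--
--     while col < len(new_grid[0]):
--         count = 0
--         for row in range(len(new_grid)-1):
--             if new_grid[row][col] <= new_grid[row+1][col]:
--                 count += 1
--         if count == len(new_grid)-1:
--             total += 1
--         col += 1
--
--     if total == len(new_grid[0]):
--         return 'YES'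
--     else:
--         return 'NO'
-- ===== SOURCE B (Python) =====
-- def gridChallenge(grid):
--     # Counting/CDF approach: no sorting. The sorted row prefixes are column-wise
--     # non-decreasing iff each row's capped character CDF dominates the next row's.
--     m = len(grid[0])
--
--     def cdf(row):
--         cnt = [0] * 128
--         for ch in row:
--             cnt[ord(ch)] += 1
--         out = []
--         s = 0
--         for k in range(128):
--             s += cnt[k]
--             out.append(min(s, m))
--         return out
--
--     prev = cdf(grid[0])
--     for row in grid[1:]:
--         cur = cdf(row)
--         if any(prev[k] < cur[k] for k in range(128)):
--             return 'NO'
--         prev = cur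
--     return 'YES'
-- ===== Notes on version B (the rewrite author's own statement) =====
-- stated objective: alternative
-- what changed: Replaces comparison sorting plus column scanning entirely: B never sorts; it builds a 128-entry character histogram per row, turns it into a cumulative distribution capped at the first row's length, and checks that each row's capped CDF pointwise dominates the next row's (multiset-dominance criterion).
import Mathlib
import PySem

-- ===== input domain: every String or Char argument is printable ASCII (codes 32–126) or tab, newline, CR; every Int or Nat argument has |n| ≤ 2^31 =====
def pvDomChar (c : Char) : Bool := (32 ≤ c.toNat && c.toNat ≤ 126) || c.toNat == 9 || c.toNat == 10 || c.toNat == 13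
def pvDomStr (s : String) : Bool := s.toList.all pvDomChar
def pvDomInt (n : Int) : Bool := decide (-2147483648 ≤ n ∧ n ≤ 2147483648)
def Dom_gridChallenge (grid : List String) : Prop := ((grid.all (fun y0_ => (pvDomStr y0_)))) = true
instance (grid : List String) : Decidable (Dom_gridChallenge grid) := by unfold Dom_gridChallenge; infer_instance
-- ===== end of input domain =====

-- B replaces A's per-row comparison sort + column-counting loops by a sort-free
-- counting method: a 128-entry histogram per row, its cumulative sums capped at the
-- first row's length, and a pointwise dominance check between adjacent rows
-- (objective: alternative algorithm).

-- ===== PORT A =====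
-- Python strings are carried as List Char after the sort/join (indexing the joined
-- string character-by-character is exactly indexing its character list).  Out-of-range
-- accesses (Python IndexError) are excluded by Pre_; getD's default is never
-- reached inside Pre_.
def gridChallenge (grid : List String) : String :=
  let newGrid : List (List Char) := grid.map (fun s => PySem.List.sorted s.toList (fun c => c) false)
  let n := newGrid.length
  let m := (newGrid.headD []).length
  let total := (List.range m).foldl (fun total col =>
    let count := (List.range (n - 1)).foldl (fun count row =>
      if ((newGrid.getD row []).getD col ' ') ≤ ((newGrid.getD (row + 1) []).getD col ' ')
      then count + 1 else count) 0
    if count = n - 1 then total + 1 else total) 0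
  if total = m then "YES" else "NO"

-- ===== PORT B =====
-- the cnt = [0]*128 histogram loop of Source B
def pvCnt128 (row : List Char) : List Nat :=
  row.foldl (fun cnt ch => cnt.set ch.toNat ((cnt.getD ch.toNat 0) + 1)) (List.replicate 128 0)

-- Source B's cdf(row): prefix sums of the histogram, each capped at m
def pvCdf (m : Nat) (row : List Char) : List Nat :=
  let cnt := pvCnt128 row
  ((List.range 128).foldl (fun (p : List Nat × Nat) k =>
      let s := p.2 + cnt.getD k 0
      (p.1 ++ [min s m], s)) ([], 0)).1

-- the for-loop over grid[1:] with early 'NO'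
def pvAltGo (m : Nat) (prev : List Nat) : List (List Char) → String
  | [] => "YES"
  | r :: rest =>
      let cur := pvCdf m r
      if (List.range 128).any (fun k => decide (prev.getD k 0 < cur.getD k 0))
      then "NO" else pvAltGo m cur rest

def gridChallenge_alt (grid : List String) : String :=
  let m := (grid.headD "").toList.length
  pvAltGo m (pvCdf m (grid.headD "").toList) ((grid.drop 1).map String.toList)

-- ===== PRECONDITION & SPEC =====
-- Pre_ excludes exactly the inputs where Python A raises IndexError: the empty
-- grid (new_grid[0]) and ragged grids with a row shorter than the first row
-- (new_grid[row][col] with col up to len(new_grid[0])-1).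
def Pre_gridChallenge (grid : List String) : Prop :=
  grid ≠ [] ∧ ∀ s ∈ grid, (grid.headD "").toList.length ≤ s.toList.length
instance (grid : List String) : Decidable (Pre_gridChallenge grid) := by
  unfold Pre_gridChallenge; infer_instance

def pvWitness_gridChallenge : List String := ["ba", "ab"]

def Spec_gridChallenge (grid : List String) (out : String) : Prop := out = gridChallenge_alt grid
instance (grid : List String) (out : String) : Decidable (Spec_gridChallenge grid out) := by unfold Spec_gridChallenge; infer_instance

-- ===== CLAIM (what is proved, stated in full; the proofs are below) =====
def Claim_equal_gridChallenge : Prop := ∀ (grid : List String), Dom_gridChallenge grid → Pre_gridChallenge grid → Spec_gridChallenge grid (gridChallenge grid)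

-- ===== LEMMAS AND PROOFS =====

def pvRows (grid : List String) : List (List Char) :=
  grid.map (fun s => PySem.List.sorted s.toList (fun c => c) false)

abbrev pvCond (g : List (List Char)) (col row : Nat) : Prop :=
  ((g.getD row []).getD col ' ') ≤ ((g.getD (row + 1) []).getD col ' ')

-- count of characters with code ≤ k / = v / < n
def pvC (l : List Char) (k : Nat) : Nat := l.countP (fun c => decide (c.toNat ≤ k))
def pvE (l : List Char) (v : Nat) : Nat := l.countP (fun c => decide (c.toNat = v))
def pvS (l : List Char) (n : Nat) : Nat := l.countP (fun c => decide (c.toNat < n))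

theorem pv_char_le (a b : Char) : a ≤ b ↔ a.toNat ≤ b.toNat := by
  rw [Char.le_def]; exact UInt32.le_iff_toNat_le

theorem pv_S_succ (l : List Char) (n : Nat) : pvS l (n + 1) = pvS l n + pvE l n := by
  unfold pvS pvE
  induction l with
  | nil => simp
  | cons a t ih =>
      simp only [List.countP_cons, ih]
      by_cases h1 : a.toNat < n
      · simp only [decide_eq_true h1, decide_eq_true (Nat.lt_succ_of_lt h1),
          decide_eq_false (by omega : ¬ a.toNat = n)]
        simp; omega
      · by_cases h2 : a.toNat = n
        · simp only [decide_eq_true h2, decide_eq_false h1,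
            decide_eq_true (by omega : a.toNat < n + 1)]
          simp; omega
        · simp only [decide_eq_false h1, decide_eq_false h2,
            decide_eq_false (by omega : ¬ a.toNat < n + 1)]
          simp

theorem pv_C_eq_S (l : List Char) (k : Nat) : pvC l k = pvS l (k + 1) := by
  unfold pvC pvS
  refine List.countP_congr (fun c _ => ?_)
  simp

-- histogram spec
theorem pv_cnt_fold (row : List Char) (acc : List Nat) (v : Nat) (hv : v < acc.length) :
    (row.foldl (fun cnt ch => cnt.set ch.toNat ((cnt.getD ch.toNat 0) + 1)) acc).getD v 0
      = acc.getD v 0 + pvE row v := by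
  unfold pvE
  induction row generalizing acc with
  | nil => simp
  | cons a t ih =>
      simp only [List.foldl_cons, List.countP_cons]
      rw [ih _ (by simpa using hv)]
      by_cases h : a.toNat = v
      · subst h
        rw [List.getD_eq_getElem?_getD, List.getElem?_set_self (by omega),
            List.getD_eq_getElem?_getD]
        simp [List.getElem?_eq_getElem hv]
        omega
      · rw [List.getD_eq_getElem?_getD, List.getElem?_set_ne (by omega),
            ← List.getD_eq_getElem?_getD]
        simp [h]

theorem pv_cnt_getD (l : List Char) (v : Nat) (hv : v < 128) :
    (pvCnt128 l).getD v 0 = pvE l v := by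
  unfold pvCnt128
  rw [pv_cnt_fold _ _ _ (by simpa using hv)]
  rw [List.getD_eq_getElem?_getD, List.getElem?_replicate]
  simp [hv]

-- cdf spec: entry k is min (count of codes ≤ k) m
theorem pv_cdf_fold (m : Nat) (l : List Char) (n : Nat) (hn : n ≤ 128) :
    ((List.range n).foldl (fun (p : List Nat × Nat) k =>
        (p.1 ++ [min (p.2 + (pvCnt128 l).getD k 0) m], p.2 + (pvCnt128 l).getD k 0)) ([], 0)).2 = pvS l n ∧
    ((List.range n).foldl (fun (p : List Nat × Nat) k =>
        (p.1 ++ [min (p.2 + (pvCnt128 l).getD k 0) m], p.2 + (pvCnt128 l).getD k 0)) ([], 0)).1.length = n ∧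
    ∀ k < n, ((List.range n).foldl (fun (p : List Nat × Nat) k =>
        (p.1 ++ [min (p.2 + (pvCnt128 l).getD k 0) m], p.2 + (pvCnt128 l).getD k 0)) ([], 0)).1.getD k 0 = min (pvS l (k + 1)) m := by
  induction n with
  | zero => exact ⟨by simp [pvS], by simp, by omega⟩
  | succ n ih =>
      obtain ⟨h2, hlen, hget⟩ := ih (by omega)
      rw [List.range_succ]
      simp only [List.foldl_append, List.foldl_cons, List.foldl_nil]
      rw [h2, pv_cnt_getD l n (by omega), ← pv_S_succ]
      refine ⟨rfl, by rw [List.length_append, hlen]; rfl, ?_⟩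
      intro k hk
      by_cases hkn : k < n
      · rw [List.getD_eq_getElem?_getD, List.getElem?_append_left (by omega : k < _),
            ← List.getD_eq_getElem?_getD]
        exact hget k hkn
      · have hk' : k = n := by omega
        subst hk'
        rw [List.getD_eq_getElem?_getD, List.getElem?_append_right (by omega),
            hlen, Nat.sub_self]
        simp

theorem pv_cdf_getD (m : Nat) (l : List Char) (k : Nat) (hk : k < 128) :
    (pvCdf m l).getD k 0 = min (pvC l k) m := by
  rw [pv_C_eq_S]
  exact (pv_cdf_fold m l 128 (by omega)).2.2 k hk

theorem pv_getD_mem {t : List Char} {j : Nat} (hjt : j < t.length) : t.getD j ' ' ∈ t := by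
  rw [List.getD_eq_getElem?_getD, List.getElem?_eq_getElem hjt]
  exact List.getElem_mem hjt

-- sorted-list CDF characterisation
theorem pv_sorted_count (x : List Char) (hx : x.Pairwise (fun a b => a ≤ b))
    (j k : Nat) (hj : j < x.length) :
    j < pvC x k ↔ (x.getD j ' ').toNat ≤ k := by
  unfold pvC
  induction x generalizing j with
  | nil => simp at hj
  | cons a t ih =>
      rw [List.pairwise_cons] at hx
      obtain ⟨ha, ht⟩ := hx
      have hzero : ¬ a.toNat ≤ k → t.countP (fun c => decide (c.toNat ≤ k)) = 0 := by
        intro hak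
        refine List.countP_eq_zero.mpr (fun c hc => ?_)
        have := (pv_char_le a c).mp (ha c hc)
        simp only [decide_eq_true_eq]
        omega
      cases j with
      | zero =>
          simp only [List.getD_cons_zero, List.countP_cons]
          by_cases hak : a.toNat ≤ k
          · simp [hak]
          · rw [hzero hak]
            simp [hak]
      | succ j =>
          have hjt : j < t.length := by simpa using hj
          simp only [List.getD_cons_succ, List.countP_cons]
          by_cases hak : a.toNat ≤ k
          · simp only [decide_eq_true hak, if_true]
            rw [← ih ht j hjt]
            omega
          · rw [hzero hak]
            simp only [decide_eq_false hak]
            constructor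
            · intro h; simp at h
            · intro h
              have := (pv_char_le a _).mp (ha _ (pv_getD_mem hjt))
              omega

-- dominance criterion for the first m entries of two sorted lists
theorem pv_pair (x y : List Char) (m : Nat)
    (hx : x.Pairwise (fun a b => a ≤ b)) (hy : y.Pairwise (fun a b => a ≤ b))
    (hmx : m ≤ x.length) (hmy : m ≤ y.length)
    (hyc : ∀ c ∈ y, c.toNat < 128) :
    (∀ j < m, (x.getD j ' ') ≤ (y.getD j ' ')) ↔
    (∀ k < 128, min (pvC y k) m ≤ min (pvC x k) m) := by
  constructor
  · intro h k _
    have hstep : ∀ j < m, j < pvC y k → j < pvC x k := by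
      intro j hjm hjy
      have hyk := (pv_sorted_count y hy j k (by omega)).mp hjy
      have hxy := (pv_char_le _ _).mp (h j hjm)
      exact (pv_sorted_count x hx j k (by omega)).mpr (by omega)
    rcases Nat.eq_zero_or_pos (min (pvC y k) m) with h0 | h0
    · omega
    · have hj := hstep (min (pvC y k) m - 1) (by omega) (by omega)
      omega
  · intro h j hjm
    set k := (y.getD j ' ').toNat with hk
    have hk128 : k < 128 := hyc _ (pv_getD_mem (by omega))
    have hjy : j < pvC y k := (pv_sorted_count y hy j k (by omega)).mpr (le_refl _)
    have := h k hk128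
    have hjx : j < pvC x k := by omega
    exact (pv_char_le _ _).mpr ((pv_sorted_count x hx j k (by omega)).mp hjx)

theorem pv_C_sorted (l : List Char) (k : Nat) :
    pvC (PySem.List.sorted l (fun c => c) false) k = pvC l k :=
  (PySem.List.sorted_perm l (fun c => c) false).countP_eq _

theorem pv_foldl_count {α : Type} (p : α → Prop) [DecidablePred p] (l : List α) (c : Nat) :
    l.foldl (fun c x => if p x then c + 1 else c) c = c + l.countP (fun x => decide (p x)) := by
  induction l generalizing c with
  | nil => simp
  | cons a t ih =>
      simp only [List.foldl_cons, List.countP_cons]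
      rw [ih]
      by_cases h : p a <;> simp [h] <;> omega

theorem pv_count_range (p : Nat → Prop) [DecidablePred p] (k : Nat) :
    (List.range k).countP (fun i => decide (p i)) = k ↔ ∀ i < k, p i := by
  constructor
  · intro h i hi
    have hlen : ((List.range k).countP (fun i => decide (p i))) = (List.range k).length := by
      simp [h]
    exact of_decide_eq_true (List.countP_eq_length.mp hlen i (List.mem_range.mpr hi))
  · intro h
    have := List.countP_eq_length.mpr
      (fun a ha => decide_eq_true (h a (List.mem_range.mp ha)))
    simpa using this

theorem pv_ite_yes (c : Prop) [Decidable c] :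
    ((if c then "YES" else "NO") : String) = "YES" ↔ c := by
  split_ifs with h
  · exact iff_of_true rfl h
  · exact iff_of_false (by decide) h

theorem pv_A_yes (grid : List String) :
    gridChallenge grid = "YES" ↔
    ∀ col < ((pvRows grid).headD []).length, ∀ row < (pvRows grid).length - 1,
      pvCond (pvRows grid) col row := by
  have e : gridChallenge grid =
      if ((List.range ((pvRows grid).headD []).length).foldl (fun total col =>
            if ((List.range ((pvRows grid).length - 1)).foldl (fun count row =>
                  if pvCond (pvRows grid) col row then count + 1 else count) 0)
                = (pvRows grid).length - 1
            then total + 1 else total) 0) = ((pvRows grid).headD []).length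
      then "YES" else "NO" := rfl
  rw [e, pv_ite_yes,
      pv_foldl_count (fun col =>
        ((List.range ((pvRows grid).length - 1)).foldl (fun count row =>
          if pvCond (pvRows grid) col row then count + 1 else count) 0)
          = (pvRows grid).length - 1)
        (List.range ((pvRows grid).headD []).length) 0,
      Nat.zero_add, pv_count_range]
  refine forall₂_congr (fun col hcol => ?_)
  rw [pv_foldl_count (fun row => pvCond (pvRows grid) col row)
        (List.range ((pvRows grid).length - 1)) 0,
      Nat.zero_add, pv_count_range]

-- B's loop: YES iff each adjacent pair's capped CDFs dominate
theorem pv_altGo_yes (m : Nat) (a : List Char) (l : List (List Char)) :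
    pvAltGo m (pvCdf m a) l = "YES" ↔
    ∀ i < l.length, ∀ k < 128,
      (pvCdf m ((a :: l).getD (i + 1) [])).getD k 0 ≤ (pvCdf m ((a :: l).getD i [])).getD k 0 := by
  induction l generalizing a with
  | nil => simp [pvAltGo]
  | cons b rest ih =>
      have e : pvAltGo m (pvCdf m a) (b :: rest) =
          if ((List.range 128).any fun k =>
              decide ((pvCdf m a).getD k 0 < (pvCdf m b).getD k 0)) = true
          then "NO" else pvAltGo m (pvCdf m b) rest := rfl
      rw [e]
      by_cases h : ((List.range 128).any fun k =>
          decide ((pvCdf m a).getD k 0 < (pvCdf m b).getD k 0)) = true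
      · rw [if_pos h]
        rcases List.any_eq_true.mp h with ⟨k, hkm, hlt⟩
        have hk : k < 128 := List.mem_range.mp hkm
        have hlt' := of_decide_eq_true hlt
        constructor
        · intro hno; exact absurd hno (by decide)
        · intro hall
          have h0 := hall 0 (by simp) k hk
          rw [List.getD_cons_zero, List.getD_cons_succ, List.getD_cons_zero] at h0
          omega
      · rw [if_neg h, ih b]
        have hab : ∀ k < 128, (pvCdf m b).getD k 0 ≤ (pvCdf m a).getD k 0 := by
          intro k hk
          by_contra hcon
          exact h (List.any_eq_true.mpr
            ⟨k, List.mem_range.mpr hk, decide_eq_true (by omega)⟩)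
        constructor
        · intro htail i hi k hk
          cases i with
          | zero =>
              rw [List.getD_cons_zero, List.getD_cons_succ, List.getD_cons_zero]
              exact hab k hk
          | succ i =>
              rw [List.getD_cons_succ, List.getD_cons_succ]
              exact htail i (by simp at hi ⊢; omega) k hk
        · intro hall i hi k hk
          have hx := hall (i + 1) (by simp at hi ⊢; omega) k hk
          rw [List.getD_cons_succ, List.getD_cons_succ] at hx
          exact hx

theorem pv_ite_yes_or_no (c : Prop) [Decidable c] :
    ((if c then "YES" else "NO") : String) = "YES" ∨ ((if c then "YES" else "NO") : String) = "NO" := by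
  split_ifs
  · left; rfl
  · right; rfl

theorem pv_yes_or_no_A (grid : List String) :
    gridChallenge grid = "YES" ∨ gridChallenge grid = "NO" :=
  pv_ite_yes_or_no _

theorem pv_yes_or_no_altGo (m : Nat) (prev : List Nat) (l : List (List Char)) :
    pvAltGo m prev l = "YES" ∨ pvAltGo m prev l = "NO" := by
  induction l generalizing prev with
  | nil => left; rfl
  | cons b rest ih =>
      have e : pvAltGo m prev (b :: rest) =
          if ((List.range 128).any fun k =>
              decide (prev.getD k 0 < (pvCdf m b).getD k 0)) = true
          then "NO" else pvAltGo m (pvCdf m b) rest := rfl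
      rw [e]
      by_cases h : ((List.range 128).any fun k =>
          decide (prev.getD k 0 < (pvCdf m b).getD k 0)) = true
      · right; rw [if_pos h]
      · rw [if_neg h]; exact ih _

theorem pv_yes_or_no_alt (grid : List String) :
    gridChallenge_alt grid = "YES" ∨ gridChallenge_alt grid = "NO" :=
  pv_yes_or_no_altGo _ _ _

theorem pv_getD_mem_list {α : Type} {t : List α} {j : Nat} (d : α) (hjt : j < t.length) :
    t.getD j d ∈ t := by
  rw [List.getD_eq_getElem?_getD, List.getElem?_eq_getElem hjt]
  exact List.getElem_mem hjt

theorem pv_getD_map_toList (grid : List String) (i : Nat) (hi : i < grid.length) :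
    (grid.map String.toList).getD i [] = (grid.getD i "").toList := by
  rw [List.getD_eq_getElem?_getD, List.getElem?_map, List.getElem?_eq_getElem hi,
      List.getD_eq_getElem?_getD, List.getElem?_eq_getElem hi]
  rfl

theorem pv_getD_rows (grid : List String) (i : Nat) (hi : i < grid.length) :
    (pvRows grid).getD i [] = PySem.List.sorted ((grid.getD i "").toList) (fun c => c) false := by
  unfold pvRows
  rw [List.getD_eq_getElem?_getD, List.getElem?_map, List.getElem?_eq_getElem hi,
      List.getD_eq_getElem?_getD, List.getElem?_eq_getElem hi]
  rfl

theorem pv_main (grid : List String) (hdom : Dom_gridChallenge grid)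
    (hpre : Pre_gridChallenge grid) : gridChallenge grid = gridChallenge_alt grid := by
  obtain ⟨hne, hlen⟩ := hpre
  cases grid with
  | nil => exact absurd rfl hne
  | cons g gs =>
  set grid := g :: gs with hgrid
  set m0 := (grid.headD "").toList.length with hm0
  set n := grid.length with hn
  -- per-row data
  have hmem : ∀ i < n, grid.getD i "" ∈ grid := fun i hi => pv_getD_mem_list "" hi
  have hrowlen : ∀ i < n, m0 ≤ ((grid.getD i "").toList).length :=
    fun i hi => hlen _ (hmem i hi)
  have hrowchar : ∀ i < n, ∀ c ∈ (grid.getD i "").toList, c.toNat < 128 := by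
    intro i hi c hc
    have hs : pvDomStr (grid.getD i "") = true := by
      have := List.all_eq_true.mp hdom _ (hmem i hi)
      simpa using this
    have hc' := List.all_eq_true.mp hs c hc
    unfold pvDomChar at hc'
    simp only [Bool.or_eq_true, Bool.and_eq_true, decide_eq_true_eq, beq_iff_eq] at hc'
    omega
  -- abbreviations
  have hiff : gridChallenge grid = "YES" ↔ gridChallenge_alt grid = "YES" := by
    rw [pv_A_yes]
    have halt : gridChallenge_alt grid =
        pvAltGo m0 (pvCdf m0 g.toList) (gs.map String.toList) := rfl
    rw [halt, pv_altGo_yes]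
    have hchain : (g.toList :: gs.map String.toList) = grid.map String.toList := rfl
    rw [hchain]
    have hrowsn : (pvRows grid).length = n := by unfold pvRows; rw [List.length_map]
    have hhead : ((pvRows grid).headD []).length = m0 := by
      have h1 : (pvRows grid).headD [] = PySem.List.sorted g.toList (fun c => c) false := rfl
      rw [h1, PySem.List.length_sorted]
      rfl
    have hgslen : (List.map String.toList gs).length = n - 1 := by
      rw [List.length_map]
      rfl
    rw [hrowsn, hhead, hgslen]
    constructor
    · intro hA i hi k hk
      rw [pv_getD_map_toList grid i (by omega), pv_getD_map_toList grid (i+1) (by omega),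
          pv_cdf_getD _ _ _ hk, pv_cdf_getD _ _ _ hk]
      rw [← pv_C_sorted ((grid.getD i "").toList) k, ← pv_C_sorted ((grid.getD (i+1) "").toList) k]
      refine ((pv_pair _ _ m0 (PySem.List.sorted_pairwise _ _) (PySem.List.sorted_pairwise _ _)
        (by rw [PySem.List.length_sorted]; exact hrowlen i (by omega))
        (by rw [PySem.List.length_sorted]; exact hrowlen (i+1) (by omega))
        (by intro c hc
            exact hrowchar (i+1) (by omega) c ((PySem.List.mem_sorted _ _ _ _).mp hc))).mp ?_) k hk
      intro j hj
      have := hA j hj i (by omega)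
      unfold pvCond at this
      rw [pv_getD_rows grid i (by omega), pv_getD_rows grid (i+1) (by omega)] at this
      exact this
    · intro hB col hcol i hi
      unfold pvCond
      rw [pv_getD_rows grid i (by omega), pv_getD_rows grid (i+1) (by omega)]
      refine ((pv_pair _ _ m0 (PySem.List.sorted_pairwise _ _) (PySem.List.sorted_pairwise _ _)
        (by rw [PySem.List.length_sorted]; exact hrowlen i (by omega))
        (by rw [PySem.List.length_sorted]; exact hrowlen (i+1) (by omega))
        (by intro c hc
            exact hrowchar (i+1) (by omega) c ((PySem.List.mem_sorted _ _ _ _).mp hc))).mpr ?_) col hcol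
      intro k hk
      have := hB i (by simpa using hi) k hk
      rw [pv_getD_map_toList grid i (by omega), pv_getD_map_toList grid (i+1) (by omega),
          pv_cdf_getD _ _ _ hk, pv_cdf_getD _ _ _ hk,
          ← pv_C_sorted ((grid.getD i "").toList) k, ← pv_C_sorted ((grid.getD (i+1) "").toList) k] at this
      exact this
  rcases pv_yes_or_no_A grid with hA | hA
  · rw [hA]; exact (hiff.mp hA).symm
  · rcases pv_yes_or_no_alt grid with hB | hB
    · have h2 := hiff.mpr hB
      rw [hA] at h2
      exact absurd h2 (by decide)
    · rw [hA, hB]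

-- ===== VERDICT (by name: the statement is the Claim_ definition above) =====
theorem gridChallenge_spec : Claim_equal_gridChallenge := by
  intro grid hdom hpre
  unfold Spec_gridChallenge
  exact pv_main grid hdom hpre
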